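-- pv_equiv track=rewrite | github.com/davemccarthy/SoulTrader | test_clinicaltrials.py | lead_sponsor_match_candidates
-- ===== SOURCE A (Python) =====
-- def lead_sponsor_match_candidates(sponsor: str) -> list[str]:
--     """
--     Variants to try with match_company_to_symbol / Yahoo search (comma entities, mergers,
--     trailing legal suffixes). Merger-derived issuer names are tried *before* the raw CT.gov
--     string so e.g. Viatris is preferred over a partial Pfizer hit on narrative sponsor text.
--     """
--     if not sponsor or not sponsor.strip():
--         return []
--     s0 = sponsor.strip()
--     priority: list[str] = []
--     rest: list[str] = []
--     seen: set[str] = set()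
--
--     def add_pri(t: str) -> None:
--         t = (t or "").strip()
--         if len(t) < 2:
--             return
--         k = t.upper()
--         if k in seen:
--             return
--         seen.add(k)
--         priority.append(t)
--
--     def add_rest(t: str) -> None:
--         t = (t or "").strip()
--         if len(t) < 2:
--             return
--         k = t.upper()
--         if k in seen:
--             return
--         seen.add(k)
--         rest.append(t)
--
--     low = s0.lower()
--     u = s0.upper()
--
--     if "viatris" in low or "merged with mylan" in low or "upjohn" in low:
--         add_pri("Viatris Inc.")
--         add_pri("Pfizer Inc.")
--     if "subsidiary of pfizer" in low or ("wyeth" in low and "pfizer" in low):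
--         add_pri("Pfizer Inc.")
--         add_pri("Wyeth LLC")
--     if "merck sharp" in low and "dohme" in low:
--         add_pri("Merck Sharp & Dohme LLC")
--         add_pri("Merck & Co., Inc.")
--     if "novartis vaccines" in low:
--         add_pri("Novartis AG")
--
--     add_rest(s0)
--
--     if "," in s0:
--         add_rest(s0.split(",", 1)[0].strip())
--
--     for suf in (
--         ", A SANOFI COMPANY",
--         ", A WHOLLY OWNED SUBSIDIARY OF PFIZER",
--         " IS NOW A WHOLLY OWNED SUBSIDIARY OF PFIZER",
--         ", INC.",
--         ", LLC",
--         " LLC",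
--         " INC.",
--         " INC",
--         " S.A.",
--         " SA",
--         " LIMITED",
--         " LTD.",
--         " LTD",
--         " PLC",
--         " AG",
--     ):
--         if u.endswith(suf):
--             add_rest(s0[: -len(suf)].rstrip(" ,"))
--
--     if u.endswith(" RESEARCH"):
--         add_rest(s0[: -len(" RESEARCH")].rstrip())
--
--     return priority + rest
-- ===== SOURCE B (Python) =====
-- _PRI_RULES = [
--     ([["viatris"], ["merged with mylan"], ["upjohn"]], ["Viatris Inc.", "Pfizer Inc."]),
--     ([["subsidiary of pfizer"], ["wyeth", "pfizer"]], ["Pfizer Inc.", "Wyeth LLC"]),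
--     ([["merck sharp", "dohme"]], ["Merck Sharp & Dohme LLC", "Merck & Co., Inc."]),
--     ([["novartis vaccines"]], ["Novartis AG"]),
-- ]
--
-- _SUFFIXES = (
--     ", A SANOFI COMPANY",
--     ", A WHOLLY OWNED SUBSIDIARY OF PFIZER",
--     " IS NOW A WHOLLY OWNED SUBSIDIARY OF PFIZER",
--     ", INC.",
--     ", LLC",
--     " LLC",
--     " INC.",
--     " INC",
--     " S.A.",
--     " SA",
--     " LIMITED",
--     " LTD.",
--     " LTD",
--     " PLC",
--     " AG",
-- )
--
--
-- def _remove_key(key: str, cands: list[str]) -> list[str]: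
--     """Drop every entry whose stripped-uppercase key equals key."""
--     return [c for c in cands if c.strip().upper() != key]
--
--
-- def _dedup(cands: list[str]) -> list[str]:
--     """First-occurrence dedup by uppercase key without any seen-set: keep the
--     stripped head (if long enough) and recurse on the tail with every
--     later same-key entry removed."""
--     if not cands:
--         return []
--     head, tail = cands[0].strip(), cands[1:]
--     if len(head) < 2:
--         return _dedup(tail)
--     return [head] + _dedup(_remove_key(head.upper(), tail))
--
--
-- def lead_sponsor_match_candidates(sponsor: str) -> list[str]:
--     """Table-driven generation (merger rules as a data table of needle groups,
--     or-of-ands) into one raw candidate list, then a recursive tail-filtering dedup."""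
--     s0 = sponsor.strip()
--     if not s0:
--         return []
--     low, u = s0.lower(), s0.upper()
--     cands = [name for groups, names in _PRI_RULES
--              if any(all(n in low for n in g) for g in groups)
--              for name in names]
--     cands.append(s0)
--     if "," in s0:
--         cands.append(s0.split(",", 1)[0].strip())
--     cands += [s0[:-len(suf)].rstrip(" ,") for suf in _SUFFIXES if u.endswith(suf)]
--     if u.endswith(" RESEARCH"):
--         cands.append(s0[:-len(" RESEARCH")].rstrip())
--     return _dedup(cands)
-- ===== Notes on version B (the rewrite author's own statement) =====
-- stated objective: alternative
-- what changed: B replaces A's if-chain with a declarative data table of merger rules (or-of-ands needle groups) generating one raw candidate list, and replaces the seen-set threaded through A's two add closures with a recursive first-occurrence dedup that filters later same-key entries out of the tail.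
import Mathlib
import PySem

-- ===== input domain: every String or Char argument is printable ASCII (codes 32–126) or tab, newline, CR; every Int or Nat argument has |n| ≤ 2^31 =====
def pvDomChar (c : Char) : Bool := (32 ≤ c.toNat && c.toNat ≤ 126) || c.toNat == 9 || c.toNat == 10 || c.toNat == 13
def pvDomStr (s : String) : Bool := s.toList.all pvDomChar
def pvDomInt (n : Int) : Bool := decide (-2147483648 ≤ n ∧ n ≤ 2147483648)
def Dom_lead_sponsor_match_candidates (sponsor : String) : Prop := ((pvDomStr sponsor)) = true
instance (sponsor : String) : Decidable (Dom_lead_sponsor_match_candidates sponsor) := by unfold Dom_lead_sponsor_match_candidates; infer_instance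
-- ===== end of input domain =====

-- B replaces A's if-chain-plus-seen-set with a data table of merger rules (or-of-ands needle
-- groups) generating one raw candidate list, finished by a recursive tail-filtering dedup that
-- uses no set at all (objective: alternative decomposition; same observable result).

-- Python's s.rstrip(chars): drop trailing characters belonging to `chars` (exact for ASCII inputs;
-- ported by hand — PySem has rstrip only for whitespace).
def pvRstripChars (s : String) (chars : List Char) : String :=
  String.ofList ((s.toList.reverse.dropWhile (· ∈ chars)).reverse)

-- the tuple of trailing legal suffixes, in source order
def pvSuffixes : List String :=
  [", A SANOFI COMPANY",
   ", A WHOLLY OWNED SUBSIDIARY OF PFIZER",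
   " IS NOW A WHOLLY OWNED SUBSIDIARY OF PFIZER",
   ", INC.",
   ", LLC",
   " LLC",
   " INC.",
   " INC",
   " S.A.",
   " SA",
   " LIMITED",
   " LTD.",
   " LTD",
   " PLC",
   " AG"]

-- ===== PORT A =====
-- A's state: (priority, rest, seen) — the two output lists and the shared seen-set of upper keys.
-- the closure add_pri
def pvA_addPri (st : List String × List String × PySem.Set String) (t : String) :
    List String × List String × PySem.Set String :=
  let t := PySem.Str.strip t
  if PySem.Str.len t < 2 then st
  else
    let k := PySem.Str.upper t
    if PySem.Set.contains st.2.2 k then st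
    else (st.1 ++ [t], st.2.1, PySem.Set.add st.2.2 k)

-- the closure add_rest
def pvA_addRest (st : List String × List String × PySem.Set String) (t : String) :
    List String × List String × PySem.Set String :=
  let t := PySem.Str.strip t
  if PySem.Str.len t < 2 then st
  else
    let k := PySem.Str.upper t
    if PySem.Set.contains st.2.2 k then st
    else (st.1, st.2.1 ++ [t], PySem.Set.add st.2.2 k)

def lead_sponsor_match_candidates (sponsor : String) : List String :=
  if sponsor == "" || PySem.Str.strip sponsor == "" then []
  else
    let s0 := PySem.Str.strip sponsor
    let st : List String × List String × PySem.Set String := ([], [], PySem.Set.empty)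
    let low := PySem.Str.lower s0
    let u := PySem.Str.upper s0
    let st := if PySem.Str.isIn "viatris" low || PySem.Str.isIn "merged with mylan" low || PySem.Str.isIn "upjohn" low then
        pvA_addPri (pvA_addPri st "Viatris Inc.") "Pfizer Inc." else st
    let st := if PySem.Str.isIn "subsidiary of pfizer" low || (PySem.Str.isIn "wyeth" low && PySem.Str.isIn "pfizer" low) then
        pvA_addPri (pvA_addPri st "Pfizer Inc.") "Wyeth LLC" else st
    let st := if PySem.Str.isIn "merck sharp" low && PySem.Str.isIn "dohme" low then
        pvA_addPri (pvA_addPri st "Merck Sharp & Dohme LLC") "Merck & Co., Inc." else st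
    let st := if PySem.Str.isIn "novartis vaccines" low then pvA_addPri st "Novartis AG" else st
    let st := pvA_addRest st s0
    let st := if PySem.Str.isIn "," s0 then
        pvA_addRest st (PySem.Str.strip ((((PySem.Str.splitMax? s0 "," 1).getD []).headD ""))) else st
    let st := pvSuffixes.foldl (fun st suf =>
        if PySem.Str.endswith u suf then
          pvA_addRest st (pvRstripChars (PySem.Str.slice s0 none (some (-(PySem.Str.len suf)))) [' ', ','])
        else st) st
    let st := if PySem.Str.endswith u " RESEARCH" then
        pvA_addRest st (PySem.Str.rstrip (PySem.Str.slice s0 none (some (-(PySem.Str.len " RESEARCH"))))) else st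
    st.1 ++ st.2.1

-- ===== PORT B =====
-- merger rules as data: (or-of-ands needle groups over `low`, candidate names)
def pvPriRules : List (List (List String) × List String) :=
  [([["viatris"], ["merged with mylan"], ["upjohn"]], ["Viatris Inc.", "Pfizer Inc."]),
   ([["subsidiary of pfizer"], ["wyeth", "pfizer"]], ["Pfizer Inc.", "Wyeth LLC"]),
   ([["merck sharp", "dohme"]], ["Merck Sharp & Dohme LLC", "Merck & Co., Inc."]),
   ([["novartis vaccines"]], ["Novartis AG"])]

-- B's `_remove_key`: drop every entry whose stripped-uppercase key is k
def pvRemoveKey (k : String) (l : List String) : List String :=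
  l.filter (fun x => !(PySem.Str.upper (PySem.Str.strip x) == k))

-- cited by pvDedup's termination proof
theorem pvRemoveKey_length_le (k : String) (l : List String) :
    (pvRemoveKey k l).length ≤ l.length := List.length_filter_le _ _

-- B's `_dedup`: first-occurrence dedup by uppercase key, no seen-set — keep the stripped head
-- (if long enough) and recurse on the tail with every later same-key entry removed.
def pvDedup : List String → List String
  | [] => []
  | c :: tail =>
    let head := PySem.Str.strip c
    if PySem.Str.len head < 2 then pvDedup tail
    else head :: pvDedup (pvRemoveKey (PySem.Str.upper head) tail)
termination_by l => l.length
decreasing_by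
  all_goals simp only [List.length_cons]
  · omega
  · exact Nat.lt_succ_of_le (pvRemoveKey_length_le _ _)

def lead_sponsor_match_candidates_alt (sponsor : String) : List String :=
  let s0 := PySem.Str.strip sponsor
  if s0 == "" then []
  else
    let low := PySem.Str.lower s0
    let u := PySem.Str.upper s0
    let cands :=
      ((pvPriRules.filter (fun r => r.1.any (fun g => g.all (fun n => PySem.Str.isIn n low)))).flatMap
        (fun r => r.2)) ++
      [s0] ++
      (if PySem.Str.isIn "," s0 then
        [PySem.Str.strip ((((PySem.Str.splitMax? s0 "," 1).getD []).headD ""))] else []) ++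
      ((pvSuffixes.filter (fun suf => PySem.Str.endswith u suf)).map (fun suf =>
        pvRstripChars (PySem.Str.slice s0 none (some (-(PySem.Str.len suf)))) [' ', ','])) ++
      (if PySem.Str.endswith u " RESEARCH" then
        [PySem.Str.rstrip (PySem.Str.slice s0 none (some (-(PySem.Str.len " RESEARCH"))))] else [])
    pvDedup cands

-- ===== PRECONDITION & SPEC =====
def Spec_lead_sponsor_match_candidates (sponsor : String) (out : List String) : Prop := out = lead_sponsor_match_candidates_alt sponsor
instance (sponsor : String) (out : List String) : Decidable (Spec_lead_sponsor_match_candidates sponsor out) := by unfold Spec_lead_sponsor_match_candidates; infer_instance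

-- ===== CLAIM (what is proved, stated in full; the proofs are below) =====
def Claim_equal_lead_sponsor_match_candidates : Prop := ∀ (sponsor : String), Dom_lead_sponsor_match_candidates sponsor → Spec_lead_sponsor_match_candidates sponsor (lead_sponsor_match_candidates sponsor)

-- ===== LEMMAS AND PROOFS =====

-- the common "strip, filter, dedup, append" step both of A's closures reduce to, on one output list
def pvAdd (p : List String × PySem.Set String) (t : String) : List String × PySem.Set String :=
  let t := PySem.Str.strip t
  if PySem.Str.len t < 2 then p
  else if PySem.Set.contains p.2 (PySem.Str.upper t) then p
  else (p.1 ++ [t], PySem.Set.add p.2 (PySem.Str.upper t))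

theorem pvA_addPri_eq (st : List String × List String × PySem.Set String) (t : String) :
    pvA_addPri st t = ((pvAdd (st.1, st.2.2) t).1, st.2.1, (pvAdd (st.1, st.2.2) t).2) := by
  simp only [pvA_addPri, pvAdd]
  split_ifs <;> rfl

theorem pvA_addRest_eq (st : List String × List String × PySem.Set String) (t : String) :
    pvA_addRest st t = (st.1, (pvAdd (st.2.1, st.2.2) t).1, (pvAdd (st.2.1, st.2.2) t).2) := by
  simp only [pvA_addRest, pvAdd]
  split_ifs <;> rfl

-- A's priority phase / rest phase as a fold of pvAdd over an explicit candidate list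
def pvApplyPri (st : List String × List String × PySem.Set String) (l : List String) :
    List String × List String × PySem.Set String :=
  ((l.foldl pvAdd (st.1, st.2.2)).1, st.2.1, (l.foldl pvAdd (st.1, st.2.2)).2)

def pvApplyRest (st : List String × List String × PySem.Set String) (l : List String) :
    List String × List String × PySem.Set String :=
  (st.1, (l.foldl pvAdd (st.2.1, st.2.2)).1, (l.foldl pvAdd (st.2.1, st.2.2)).2)

theorem pvApplyPri_nil (st : List String × List String × PySem.Set String) :
    pvApplyPri st [] = st := by simp [pvApplyPri]

theorem pvApplyRest_nil (st : List String × List String × PySem.Set String) :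
    pvApplyRest st [] = st := by simp [pvApplyRest]

theorem pvApplyPri_append (st : List String × List String × PySem.Set String) (l₁ l₂ : List String) :
    pvApplyPri st (l₁ ++ l₂) = pvApplyPri (pvApplyPri st l₁) l₂ := by
  simp [pvApplyPri, List.foldl_append]

theorem pvApplyRest_append (st : List String × List String × PySem.Set String) (l₁ l₂ : List String) :
    pvApplyRest st (l₁ ++ l₂) = pvApplyRest (pvApplyRest st l₁) l₂ := by
  simp [pvApplyRest, List.foldl_append]

theorem pvApplyPri_one (st : List String × List String × PySem.Set String) (x : String) :
    pvApplyPri st [x] = pvA_addPri st x := by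
  simp [pvApplyPri, pvA_addPri_eq]

theorem pvApplyRest_one (st : List String × List String × PySem.Set String) (x : String) :
    pvApplyRest st [x] = pvA_addRest st x := by
  simp [pvApplyRest, pvA_addRest_eq]

theorem pvApplyPri_two (st : List String × List String × PySem.Set String) (x y : String) :
    pvApplyPri st [x, y] = pvA_addPri (pvA_addPri st x) y := by
  have h : [x, y] = [x] ++ [y] := rfl
  rw [h, pvApplyPri_append, pvApplyPri_one, pvApplyPri_one]

theorem pvApplyPri_if (st : List String × List String × PySem.Set String) (c : Bool) (x y : String) :
    (if c then pvA_addPri (pvA_addPri st x) y else st) = pvApplyPri st (if c then [x, y] else []) := by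
  cases c <;> simp [pvApplyPri_nil, pvApplyPri_two]

theorem pvApplyPri_if1 (st : List String × List String × PySem.Set String) (c : Bool) (x : String) :
    (if c then pvA_addPri st x else st) = pvApplyPri st (if c then [x] else []) := by
  cases c <;> simp [pvApplyPri_nil, pvApplyPri_one]

theorem pvApplyRest_if (st : List String × List String × PySem.Set String) (c : Bool) (x : String) :
    (if c then pvA_addRest st x else st) = pvApplyRest st (if c then [x] else []) := by
  cases c <;> simp [pvApplyRest_nil, pvApplyRest_one]

-- the suffix for-loop is the rest phase over the filtered/mapped suffix list
theorem pvApplyRest_loop (l : List String) (st : List String × List String × PySem.Set String)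
    (p : String → Bool) (f : String → String) :
    l.foldl (fun st suf => if p suf then pvA_addRest st (f suf) else st) st
      = pvApplyRest st ((l.filter p).map f) := by
  induction l generalizing st with
  | nil => simp [pvApplyRest_nil]
  | cons suf l ih =>
    by_cases h : p suf
    · simp only [List.foldl_cons, h, if_true, List.filter_cons_of_pos h, List.map_cons]
      rw [ih, ← pvApplyRest_one, ← pvApplyRest_append]
      rfl
    · simp only [List.foldl_cons, h, List.filter_cons_of_neg h]
      exact ih st

-- the accumulated output list shifts out of the fold
theorem pvAdd_foldl_shift (l : List String) (a : List String) (s : PySem.Set String) :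
    l.foldl pvAdd (a, s) = (a ++ (l.foldl pvAdd ([], s)).1, (l.foldl pvAdd ([], s)).2) := by
  induction l generalizing a s with
  | nil => simp
  | cons t l ih =>
    simp only [List.foldl_cons]
    by_cases h1 : PySem.Str.len (PySem.Str.strip t) < 2
    · have hskip : ∀ b : List String, pvAdd (b, s) t = (b, s) := by
        intro b; simp only [pvAdd]; rw [if_pos h1]
      rw [hskip a, hskip [], ih a s]
    · by_cases h2 : PySem.Set.contains s (PySem.Str.upper (PySem.Str.strip t)) = true
      · have hskip : ∀ b : List String, pvAdd (b, s) t = (b, s) := by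
          intro b; simp only [pvAdd]; rw [if_neg h1, if_pos h2]
        rw [hskip a, hskip [], ih a s]
      · have hpush : ∀ b : List String, pvAdd (b, s) t
            = (b ++ [PySem.Str.strip t], PySem.Set.add s (PySem.Str.upper (PySem.Str.strip t))) := by
          intro b; simp only [pvAdd]; rw [if_neg h1, if_neg h2]
        rw [hpush a, hpush [], List.nil_append,
            ih (a ++ [PySem.Str.strip t]), ih [PySem.Str.strip t]]
        simp

theorem pvAdd_foldl_shift' (l : List String) (q : List String × PySem.Set String) :
    l.foldl pvAdd q = (q.1 ++ (l.foldl pvAdd ([], q.2)).1, (l.foldl pvAdd ([], q.2)).2) := by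
  obtain ⟨a, s⟩ := q
  exact pvAdd_foldl_shift l a s

-- set membership after add (String has lawful BEq)
theorem pv_contains_add (s : PySem.Set String) (k x : String) :
    PySem.Set.contains (PySem.Set.add s k) x = (PySem.Set.contains s x || x == k) := by
  simp only [PySem.Set.contains, PySem.Set.add]
  by_cases h : List.contains s k
  · rw [if_pos h]
    by_cases hx : x = k
    · subst hx; simp_all
    · simp [hx]
  · rw [if_neg h]
    by_cases hx : x = k <;> simp_all

theorem pv_contains_empty (x : String) :
    PySem.Set.contains PySem.Set.empty x = false := by
  simp [PySem.Set.contains, PySem.Set.empty]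

-- B's recursive dedup computes the output list of A's seen-set fold
theorem pvDedup_cons (c : String) (tail : List String) :
    pvDedup (c :: tail) =
      if PySem.Str.len (PySem.Str.strip c) < 2 then pvDedup tail
      else PySem.Str.strip c :: pvDedup (pvRemoveKey (PySem.Str.upper (PySem.Str.strip c)) tail) := by
  simp only [pvDedup]

set_option maxHeartbeats 2000000 in
theorem pvDedup_fold (l : List String) (s : PySem.Set String) :
    (l.foldl pvAdd ([], s)).1
      = pvDedup (l.filter (fun c => !(PySem.Set.contains s (PySem.Str.upper (PySem.Str.strip c))))) := by
  induction l generalizing s with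
  | nil => simp [pvDedup]
  | cons c l ih =>
    rw [List.foldl_cons, List.filter_cons]
    by_cases hc : PySem.Set.contains s (PySem.Str.upper (PySem.Str.strip c)) = true
    · -- already seen: both sides drop c
      have hA : pvAdd ([], s) c = ([], s) := by
        simp only [pvAdd]
        split_ifs <;> simp_all
      rw [hA]
      simp only [hc, Bool.not_true, Bool.false_eq_true, if_false]
      exact ih s
    · have hc' : PySem.Set.contains s (PySem.Str.upper (PySem.Str.strip c)) = false :=
        Bool.eq_false_iff.mpr hc
      simp only [hc', Bool.not_false, if_true]
      by_cases h1 : PySem.Str.len (PySem.Str.strip c) < 2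
      · -- too short: A skips without touching seen; B's dedup drops the head, tail unfiltered
        have hA : pvAdd ([], s) c = ([], s) := by
          simp only [pvAdd]; rw [if_pos h1]
        rw [hA, pvDedup_cons, if_pos h1]
        exact ih s
      · -- fresh valid candidate: both emit strip c; remaining duplicates hide behind the key
        have hA : pvAdd ([], s) c
            = ([PySem.Str.strip c], PySem.Set.add s (PySem.Str.upper (PySem.Str.strip c))) := by
          simp only [pvAdd]; rw [if_neg h1, if_neg hc]; simp
        rw [hA]
        rw [pvDedup_cons, if_neg h1]
        rw [pvAdd_foldl_shift]
        rw [ih]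
        simp only [List.singleton_append]
        refine congrArg (List.cons _) (congrArg pvDedup ?_)
        simp only [pvRemoveKey, List.filter_filter]
        apply List.filter_congr
        intro x _
        rw [pv_contains_add]
        cases hx : PySem.Set.contains s (PySem.Str.upper (PySem.Str.strip x)) <;>
          cases hk : (PySem.Str.upper (PySem.Str.strip x) == PySem.Str.upper (PySem.Str.strip c)) <;>
          simp only [hx, hk, Bool.or_false, Bool.or_true, Bool.false_or, Bool.true_or,
            Bool.not_true, Bool.not_false, Bool.and_false, Bool.and_true, Bool.false_and,
            Bool.true_and]

theorem pvDedup_fold_empty (l : List String) :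
    (l.foldl pvAdd ([], PySem.Set.empty)).1 = pvDedup l := by
  rw [pvDedup_fold]
  congr 1
  apply List.filter_eq_self.mpr
  intro x _
  rw [pv_contains_empty]
  rfl

-- unfolding B's concrete rule table into A's four condition/candidate blocks
theorem pvRules_unfold (low : String) :
    ((pvPriRules.filter (fun r => r.1.any (fun g => g.all (fun n => PySem.Str.isIn n low)))).flatMap
        (fun r => r.2))
      = (if PySem.Str.isIn "viatris" low || PySem.Str.isIn "merged with mylan" low || PySem.Str.isIn "upjohn" low then
          ["Viatris Inc.", "Pfizer Inc."] else []) ++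
        (if PySem.Str.isIn "subsidiary of pfizer" low || (PySem.Str.isIn "wyeth" low && PySem.Str.isIn "pfizer" low) then
          ["Pfizer Inc.", "Wyeth LLC"] else []) ++
        (if PySem.Str.isIn "merck sharp" low && PySem.Str.isIn "dohme" low then
          ["Merck Sharp & Dohme LLC", "Merck & Co., Inc."] else []) ++
        (if PySem.Str.isIn "novartis vaccines" low then ["Novartis AG"] else []) := by
  simp only [pvPriRules, List.filter_cons, List.filter_nil, List.any_cons, List.any_nil,
    List.all_cons, List.all_nil, Bool.and_true, Bool.or_false]
  split_ifs <;> simp_all [List.flatMap]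

-- ===== VERDICT (by name: the statement is the Claim_ definition above) =====
theorem lead_sponsor_match_candidates_spec : Claim_equal_lead_sponsor_match_candidates := by
  unfold Claim_equal_lead_sponsor_match_candidates Spec_lead_sponsor_match_candidates
  intro sponsor _
  by_cases hs : PySem.Str.strip sponsor == ""
  · have hA : (sponsor == "" || PySem.Str.strip sponsor == "") = true := by
      simp_all
    unfold lead_sponsor_match_candidates lead_sponsor_match_candidates_alt
    rw [if_pos hA, if_pos hs]
  · have hA : ¬ (sponsor == "" || PySem.Str.strip sponsor == "") = true := by
      intro hcon
      rcases Bool.or_eq_true_iff.mp hcon with h | h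
      · exact hs (by rw [beq_iff_eq] at h; rw [h]; rfl)
      · exact hs h
    unfold lead_sponsor_match_candidates lead_sponsor_match_candidates_alt
    rw [if_neg hA, if_neg hs]
    simp only [pvRules_unfold, ← pvDedup_fold_empty]
    rw [pvApplyPri_if, pvApplyPri_if, pvApplyPri_if, pvApplyPri_if1,
        pvApplyRest_if, pvApplyRest_loop, pvApplyRest_if, ← pvApplyRest_one]
    rw [← pvApplyPri_append, ← pvApplyPri_append, ← pvApplyPri_append,
        ← pvApplyRest_append, ← pvApplyRest_append, ← pvApplyRest_append]
    have key : ∀ (L1 L2 : List String),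
        (L1.foldl pvAdd ([], PySem.Set.empty)).1
          ++ (L2.foldl pvAdd ([], (L1.foldl pvAdd ([], PySem.Set.empty)).2)).1
        = ((L1 ++ L2).foldl pvAdd ([], PySem.Set.empty)).1 := by
      intro L1 L2
      rw [List.foldl_append, pvAdd_foldl_shift' L2 (L1.foldl pvAdd ([], PySem.Set.empty))]
    simp only [pvApplyPri, pvApplyRest]
    rw [key]
    simp only [List.append_assoc]
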